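-- pv_equiv track=rewrite | github.com/lucasgasparbal/algo1-fcen | guia7/e2.py | cerosEnPosicionesPares2
-- ===== SOURCE A (Python) =====
-- def cerosEnPosicionesPares2(s:list[int])->list[int]:
--     res:list[int] = []
--     for i in range(len(s)):
--         if i % 2 == 0:
--             res.append(0)
--         else:
--             res.append(s[i])
--
--     return res
-- ===== SOURCE B (Python) =====
-- def cerosEnPosicionesPares2(s: list[int]) -> list[int]:
--     res = list(s)
--     res[::2] = [0] * ((len(s) + 1) // 2)
--     return res
-- ===== Notes on version B (the rewrite author's own statement) =====
-- stated objective: idiomatic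
-- what changed: B copies the input and overwrites all even-index positions at once with a strided slice assignment instead of building the result element by element with a per-index parity branch.
import Mathlib
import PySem

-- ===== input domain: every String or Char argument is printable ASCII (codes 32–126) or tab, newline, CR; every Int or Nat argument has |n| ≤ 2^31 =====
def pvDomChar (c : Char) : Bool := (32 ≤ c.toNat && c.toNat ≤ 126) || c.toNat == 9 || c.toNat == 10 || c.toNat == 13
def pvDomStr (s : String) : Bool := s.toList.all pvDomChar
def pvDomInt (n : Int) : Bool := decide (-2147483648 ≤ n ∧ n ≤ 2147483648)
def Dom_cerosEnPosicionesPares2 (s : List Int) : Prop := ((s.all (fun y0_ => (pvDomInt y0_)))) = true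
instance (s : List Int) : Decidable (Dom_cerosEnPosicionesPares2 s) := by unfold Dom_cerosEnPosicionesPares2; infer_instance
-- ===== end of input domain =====

-- B replaces A's per-index parity branch with a copy plus a strided overwrite of the even positions (idiomatic slice assignment).

-- ===== PORT A =====
def cerosEnPosicionesPares2 (s : List Int) : List Int :=
  (PySem.List.pyRange 0 (s.length : Int) 1).foldl
    (fun res i => res ++ [if i % 2 == 0 then (0 : Int) else PySem.List.pyGetD s i 0]) []

-- ===== PORT B =====
-- slice assignment res[::2] = zs: overwrite positions 0,2,4,… of the copy with the elements of zs in order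
def pvAssignStep2 : List Int → List Int → List Int
  | z :: zs, _ :: y :: rest => z :: y :: pvAssignStep2 zs rest
  | z :: _, [_] => [z]
  | _, xs => xs

def cerosEnPosicionesPares2_alt (s : List Int) : List Int :=
  pvAssignStep2 (List.replicate (PySem.Int.floordiv ((s.length : Int) + 1) 2).toNat 0) s

-- ===== PRECONDITION & SPEC =====
def Spec_cerosEnPosicionesPares2 (s : List Int) (out : List Int) : Prop := out = cerosEnPosicionesPares2_alt s
instance (s : List Int) (out : List Int) : Decidable (Spec_cerosEnPosicionesPares2 s out) := by unfold Spec_cerosEnPosicionesPares2; infer_instance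

-- ===== CLAIM (what is proved, stated in full; the proofs are below) =====
def Claim_equal_cerosEnPosicionesPares2 : Prop := ∀ (s : List Int), Dom_cerosEnPosicionesPares2 s → Spec_cerosEnPosicionesPares2 s (cerosEnPosicionesPares2 s)

-- ===== LEMMAS AND PROOFS =====

theorem portA_eq_map (s : List Int) :
    cerosEnPosicionesPares2 s =
      (List.range s.length).map
        (fun (k : Nat) => if ((k : Int)) % 2 == 0 then (0 : Int) else PySem.List.pyGetD s ((k : Int)) 0) := by
  unfold cerosEnPosicionesPares2
  rw [PySem.List.foldl_append_singleton_eq_map, PySem.List.pyRange_one]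
  simp only [Int.sub_zero, Int.toNat_natCast, List.map_map, List.nil_append]
  apply List.map_congr_left
  intro k _
  simp

theorem zeroCount_cons_cons (x y : Int) (rest : List Int) :
    (PySem.Int.floordiv (((x :: y :: rest).length : Int) + 1) 2).toNat
      = (PySem.Int.floordiv ((rest.length : Int) + 1) 2).toNat + 1 := by
  rw [PySem.Int.floordiv_eq_ediv_of_pos (by omega), PySem.Int.floordiv_eq_ediv_of_pos (by omega)]
  simp only [List.length_cons]
  omega

theorem equiv_aux : ∀ (s : List Int), cerosEnPosicionesPares2 s = cerosEnPosicionesPares2_alt s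
  | [] => by
      rw [portA_eq_map]
      simp [cerosEnPosicionesPares2_alt, pvAssignStep2]
  | [x] => by
      rw [portA_eq_map]
      simp [cerosEnPosicionesPares2_alt, pvAssignStep2]
  | x :: y :: rest => by
      have ih := equiv_aux rest
      rw [portA_eq_map] at ih ⊢
      unfold cerosEnPosicionesPares2_alt at ih ⊢
      rw [zeroCount_cons_cons, List.replicate_succ]
      simp only [List.length_cons]
      rw [List.range_succ_eq_map, List.range_succ_eq_map]
      simp only [List.map_cons, List.map_map]
      rw [pvAssignStep2]
      have h0 : ((((0 : Nat) : Int) % 2 == 0) = true) := by decide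
      have h1 : ((((0 : Nat).succ : Int) % 2 == 0) = false) := by decide
      simp only [h0, h1, if_true]
      have hy : PySem.List.pyGetD (x :: y :: rest) (((0 : Nat).succ : Int)) 0 = y := by
        rw [show (((0 : Nat).succ : Int)) = ((1 : Nat) : Int) by norm_num,
          PySem.List.pyGetD_natCast]
        rfl
      rw [hy]
      refine congrArg (fun l => 0 :: y :: l) ?_
      rw [← ih]
      apply List.map_congr_left
      intro k _
      simp only [Function.comp_apply]
      have hpar : (((k.succ.succ : Nat) : Int) % 2 == 0) = (((k : Nat) : Int) % 2 == 0) := by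
        push_cast
        rcases Int.emod_two_eq_zero_or_one (k : Int) with h | h <;>
          simp [h] <;> omega
      rw [hpar]
      by_cases hk : ((((k : Nat) : Int) % 2 == 0) = true)
      · simp [hk]
      · simp only [Bool.not_eq_true] at hk
        simp only [hk, Bool.false_eq_true, if_false]
        rw [PySem.List.pyGetD_natCast, PySem.List.pyGetD_natCast]
        rfl

-- ===== VERDICT (by name: the statement is the Claim_ definition above) =====
theorem cerosEnPosicionesPares2_spec : Claim_equal_cerosEnPosicionesPares2 := by
  intro s _
  unfold Spec_cerosEnPosicionesPares2
  exact equiv_aux s
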